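-- pv_equiv track=rewrite | github.com/KrystiSoof/ST-CardDataViewer | core/formatter.py | remove_json_comments
-- ===== SOURCE A (Python) =====
-- def remove_json_comments(json_text: str) -> str:
--     """
--     Remove comments from JSON text.
--
--     Args:
--         json_text: JSON string possibly containing comments
--
--     Returns:
--         Cleaned JSON string
--     """
--     lines: list[str] = []
--     for line in json_text.split('\n'):
--         # Skip comment-only lines
--         stripped = line.strip()
--         if stripped.startswith('#'):
--             continue
--
--         # Remove inline comments
--         if '#' in line and not line.strip().startswith('#'):
--             # Only remove # if it's not inside a string
--             in_string = False
--             for i, char in enumerate(line):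
--                 if char == '"':
--                     in_string = not in_string
--                 elif char == '#' and not in_string:
--                     line = line[:i]
--                     break
--             lines.append(line)
--         else:
--             lines.append(line)
--
--     return '\n'.join(lines)
-- ===== SOURCE B (Python) =====
-- def remove_json_comments(json_text: str) -> str:
--     """Strip '#' comments: drop comment-only lines, truncate each line at the
--     first '#' that sits outside a (naively quote-toggled) "..." string."""
--     out = []
--     for line in json_text.split('\n'):
--         if line.strip().startswith('#'):
--             continue
--         # Split on quotes: even-indexed pieces are outside strings.
--         cut = -1
--         pos = 0
--         for i, part in enumerate(line.split('"')):
--             if i % 2 == 0 and '#' in part: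
--                 cut = pos + part.find('#')
--                 break
--             pos += len(part) + 1
--         out.append(line if cut == -1 else line[:cut])
--     return '\n'.join(out)
-- ===== Notes on version B (the rewrite author's own statement) =====
-- stated objective: alternative
-- what changed: The inner character-by-character quote-toggle state machine is replaced by splitting each line on '"' and scanning only the even-indexed (outside-string) pieces for the first '#', computing the cut position from accumulated piece lengths.
import Mathlib
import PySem

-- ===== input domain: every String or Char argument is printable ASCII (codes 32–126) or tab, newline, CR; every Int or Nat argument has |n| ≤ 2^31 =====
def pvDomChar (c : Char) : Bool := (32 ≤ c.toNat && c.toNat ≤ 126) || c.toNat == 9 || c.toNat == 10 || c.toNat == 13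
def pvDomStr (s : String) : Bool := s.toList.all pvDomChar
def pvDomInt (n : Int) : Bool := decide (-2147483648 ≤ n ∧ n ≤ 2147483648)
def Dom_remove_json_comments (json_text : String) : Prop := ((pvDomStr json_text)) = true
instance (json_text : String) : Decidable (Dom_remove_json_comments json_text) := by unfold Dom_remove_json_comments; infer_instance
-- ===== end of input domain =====

-- B replaces A's per-character quote-toggle state machine with a split-on-'"' scan of the
-- outside-string pieces (objective: alternative algorithm of the same cost).

-- ===== PORT A =====
-- inner loop: for i, char in enumerate(line): toggle on '"', cut at '#' outside a string
def pvScanA (full : List Char) : List Char → Bool → Nat → List Char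
  | [], _, _ => full
  | c :: rest, inStr, i =>
    if c == '"' then pvScanA full rest (!inStr) (i + 1)
    else if c == '#' && !inStr then PySem.List.slice full none (some (i : Int))  -- line[:i]
    else pvScanA full rest inStr (i + 1)

-- one iteration of A's outer 'for line in json_text.split('\n')' loop
def pvLineA (acc : List (List Char)) (line : List Char) : List (List Char) :=
  let stripped := PySem.Chars.strip line
  if PySem.Chars.startswith stripped ['#'] then acc
  else if PySem.Chars.isIn ['#'] line && !(PySem.Chars.startswith (PySem.Chars.strip line) ['#']) then
    acc ++ [pvScanA line line false 0]
  else acc ++ [line]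

def remove_json_comments (json_text : String) : String :=
  String.ofList (PySem.Chars.join ['\n']
    ((PySem.Chars.splitOn json_text.toList ['\n']).foldl pvLineA []))

-- ===== PORT B =====
-- for i, part in enumerate(line.split('"')): even pieces are outside strings; break at first '#'
-- (the index parity i % 2 == 0 is carried as the Bool 'even', pos accumulates piece lengths)
def pvFindCut : List (List Char) → Bool → Nat → Int
  | [], _, _ => -1
  | p :: ps, even, pos =>
    if even && PySem.Chars.isIn ['#'] p then (pos : Int) + PySem.Chars.find p ['#']
    else pvFindCut ps (!even) (pos + p.length + 1)

def pvLineB (acc : List (List Char)) (line : List Char) : List (List Char) :=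
  if PySem.Chars.startswith (PySem.Chars.strip line) ['#'] then acc
  else
    let cut := pvFindCut (PySem.Chars.splitOn line ['"']) true 0
    acc ++ [if cut == -1 then line else PySem.List.slice line none (some cut)]

def remove_json_comments_alt (json_text : String) : String :=
  String.ofList (PySem.Chars.join ['\n']
    ((PySem.Chars.splitOn json_text.toList ['\n']).foldl pvLineB []))

-- ===== PRECONDITION & SPEC =====
def Spec_remove_json_comments (json_text : String) (out : String) : Prop := out = remove_json_comments_alt json_text
instance (json_text : String) (out : String) : Decidable (Spec_remove_json_comments json_text out) := by unfold Spec_remove_json_comments; infer_instance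

-- ===== CLAIM (what is proved, stated in full; the proofs are below) =====
def Claim_equal_remove_json_comments : Prop := ∀ (json_text : String), Dom_remove_json_comments json_text → Spec_remove_json_comments json_text (remove_json_comments json_text)

-- ===== LEMMAS AND PROOFS =====

-- proof-side simple single-char splitter, used to characterise Chars.splitOn l [c]
def pvSplitC (c : Char) : List Char → List (List Char)
  | [] => [[]]
  | d :: rest =>
    match pvSplitC c rest with
    | [] => [[]]   -- unreachable
    | p :: ps => if d == c then [] :: p :: ps else (d :: p) :: ps

-- proof-side: index of the first '#', used to characterise Chars.find/isIn for sub = "#"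
def pvFirstHash? : List Char → Option Nat
  | [] => none
  | d :: rest => if d == '#' then some 0 else (pvFirstHash? rest).map (· + 1)

theorem pvSplitC_ne_nil (c : Char) (l : List Char) : pvSplitC c l ≠ [] := by
  cases l with
  | nil => simp [pvSplitC]
  | cons d rest =>
    simp only [pvSplitC]
    rcases h : pvSplitC c rest with _ | ⟨p, ps⟩ <;> (simp; try split) <;> simp

theorem pv_find_go_hash (p : List Char) : ∀ k : Nat,
    PySem.Chars.find.go ['#'] p k =
      match pvFirstHash? p with
      | none => -1
      | some j => ((k + j : Nat) : Int) := by
  induction p with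
  | nil => intro k; simp [PySem.Chars.find.go, pvFirstHash?]
  | cons d rest ih =>
    intro k
    by_cases hd : d = '#'
    · subst hd; simp [PySem.Chars.find.go, pvFirstHash?, List.isPrefixOf]
    · have hne : (d == '#') = false := by simp [hd]
      simp only [PySem.Chars.find.go, pvFirstHash?, List.isPrefixOf, hne]
      rw [if_neg (by simp [Bool.and_true]; exact fun h => hd h.symm), ih (k + 1)]
      cases h : pvFirstHash? rest with
      | none => simp
      | some j => simp only [Option.map_some]; push_cast; ring

theorem pv_find_hash (p : List Char) :
    PySem.Chars.find p ['#'] =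
      match pvFirstHash? p with
      | none => -1
      | some j => (j : Int) := by
  have := pv_find_go_hash p 0
  simpa [PySem.Chars.find] using this

theorem pv_isIn_hash (p : List Char) :
    PySem.Chars.isIn ['#'] p = (pvFirstHash? p).isSome := by
  rw [PySem.Chars.isIn, pv_find_hash]
  cases h : pvFirstHash? p <;> simp

theorem pvFirstHash?_eq_none_iff (p : List Char) : pvFirstHash? p = none ↔ '#' ∉ p := by
  induction p with
  | nil => simp [pvFirstHash?]
  | cons d rest ih =>
    by_cases hd : d = '#'
    · subst hd; simp [pvFirstHash?]
    · simp [pvFirstHash?, hd, ih, Ne.symm hd]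

-- Chars.splitOn.go characterised for a single-char separator
theorem pv_splitOn_go_single (c : Char) : ∀ (fuel : Nat) (l cur : List Char)
    (acc : List (List Char)), l.length < fuel →
    PySem.Chars.splitOn.go [c] fuel l cur acc =
      acc.reverse ++ (pvSplitC c l).modifyHead (cur.reverse ++ ·) := by
  intro fuel
  induction fuel with
  | zero => intro l cur acc h; omega
  | succ fuel ih =>
    intro l cur acc h
    cases l with
    | nil => simp [PySem.Chars.splitOn.go, pvSplitC]
    | cons d rest =>
      rcases hs : pvSplitC c rest with _ | ⟨p, ps⟩
      · exact absurd hs (pvSplitC_ne_nil c rest)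
      by_cases hd : d = c
      · subst hd
        have hpre : List.isPrefixOf [d] (d :: rest) = true := by simp [List.isPrefixOf]
        simp only [PySem.Chars.splitOn.go, hpre, if_true, List.length_cons, List.length_nil,
          List.drop_succ_cons, List.drop_zero]
        rw [
          ih rest [] (cur.reverse :: acc) (by simp at h ⊢; omega)]
        simp [pvSplitC, hs]
      · have hpre : List.isPrefixOf [c] (d :: rest) = false := by
          simp [List.isPrefixOf]; exact fun hc => absurd hc.symm hd
        simp only [PySem.Chars.splitOn.go, hpre, Bool.false_eq_true, if_false]
        rw [ih rest (d :: cur) acc (by simp at h ⊢; omega)]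
        simp [pvSplitC, hs, hd]

theorem pv_splitOn_single (c : Char) (l : List Char) :
    PySem.Chars.splitOn l [c] = pvSplitC c l := by
  rw [PySem.Chars.splitOn, pv_splitOn_go_single c (l.length + 1) l [] [] (by omega)]
  rcases h : pvSplitC c l with _ | ⟨p, ps⟩
  · exact absurd h (pvSplitC_ne_nil c l)
  · simp

-- scanning a hash-free suffix leaves the line untouched
theorem pvScanA_no_hash (full : List Char) : ∀ (cs : List Char) (b : Bool) (i : Nat),
    '#' ∉ cs → pvScanA full cs b i = full := by
  intro cs
  induction cs with
  | nil => intro b i _; simp [pvScanA]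
  | cons d rest ih =>
    intro b i h
    simp only [List.mem_cons, not_or] at h
    have hd : d ≠ '#' := fun he => h.1 he.symm
    have hrest : '#' ∉ rest := h.2
    by_cases hq : d = '"'
    · subst hq; simp only [pvScanA, BEq.rfl, if_true]; exact ih _ _ hrest
    · simp only [pvScanA]
      rw [if_neg (by simp [hq]), if_neg (by simp [hd])]
      exact ih _ _ hrest

-- THE CORE LEMMA: A's state-machine scan equals B's cut computed from the quote-split
theorem pv_scan_eq_cut (full : List Char) : ∀ (cs : List Char) (inStr : Bool) (i : Nat),
    pvScanA full cs inStr i =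
      (if pvFindCut (pvSplitC '"' cs) (!inStr) i == -1 then full
       else PySem.List.slice full none (some (pvFindCut (pvSplitC '"' cs) (!inStr) i))) := by
  intro cs
  induction cs with
  | nil =>
    intro inStr i
    simp [pvScanA, pvSplitC, pvFindCut, pv_isIn_hash, pvFirstHash?]
  | cons d rest ih =>
    intro inStr i
    rcases hs : pvSplitC '"' rest with _ | ⟨p, ps⟩
    · exact absurd hs (pvSplitC_ne_nil '"' rest)
    by_cases hq : d = '"'
    · -- quote: toggle
      subst hq
      simp only [pvScanA, BEq.rfl, if_true, pvSplitC, hs]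
      rw [ih (!inStr) (i + 1)]
      have hnil : PySem.Chars.isIn ['#'] ([] : List Char) = false := by
        simp [pv_isIn_hash, pvFirstHash?]
      simp [pvFindCut, hnil, hs, Bool.not_not]
    · -- non-quote character
      have hsplit : pvSplitC '"' (d :: rest) = (d :: p) :: ps := by
        simp only [pvSplitC, hs]
        rw [if_neg (by simp [hq])]
      by_cases hi : inStr = false
      · subst hi
        by_cases hd : d = '#'
        · -- cut here
          subst hd
          simp only [pvScanA]
          rw [if_neg (by simp), if_pos (by simp), hsplit]
          have hin : PySem.Chars.isIn ['#'] ('#' :: p) = true := by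
            simp [pv_isIn_hash, pvFirstHash?]
          have hf : PySem.Chars.find ('#' :: p) ['#'] = 0 := by
            simp [pv_find_hash, pvFirstHash?]
          have hv : pvFindCut (('#' :: p) :: ps) (!false) i = (i : Int) := by
            simp [pvFindCut, hin, hf]
          rw [hv, if_neg (by simp)]
        · -- ordinary character outside a string
          simp only [pvScanA]
          rw [if_neg (by simp [hq]), if_neg (by simp [hd]), ih false (i + 1), hsplit, hs]
          cases hfh : pvFirstHash? p with
          | some j =>
            have hin : PySem.Chars.isIn ['#'] (d :: p) = true := by
              simp [pv_isIn_hash, pvFirstHash?, hd, hfh]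
            have hin' : PySem.Chars.isIn ['#'] p = true := by
              simp [pv_isIn_hash, hfh]
            have hf : PySem.Chars.find (d :: p) ['#'] = (j : Int) + 1 := by
              simp [pv_find_hash, pvFirstHash?, hd, hfh]
            have hf' : PySem.Chars.find p ['#'] = (j : Int) := by
              simp [pv_find_hash, hfh]
            have h1 : pvFindCut ((d :: p) :: ps) (!false) i = (i : Int) + ((j : Int) + 1) := by
              simp [pvFindCut, hin, hf]
            have h2 : pvFindCut (p :: ps) (!false) (i + 1) = ((i + 1 : Nat) : Int) + (j : Int) := by
              simp [pvFindCut, hin', hf']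
            simp only [Bool.not_false] at h1 h2 ⊢
            rw [h1, h2]
            have he : (i : Int) + ((j : Int) + 1) = ((i + 1 : Nat) : Int) + (j : Int) := by
              push_cast; ring
            rw [he]
          | none =>
            have hin : PySem.Chars.isIn ['#'] (d :: p) = false := by
              simp [pv_isIn_hash, pvFirstHash?, hd, hfh]
            have hin' : PySem.Chars.isIn ['#'] p = false := by
              simp [pv_isIn_hash, hfh]
            have h1 : pvFindCut ((d :: p) :: ps) (!false) i
                = pvFindCut ps false (i + (d :: p).length + 1) := by
              simp [pvFindCut, hin]
            have h2 : pvFindCut (p :: ps) (!false) (i + 1)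
                = pvFindCut ps false (i + 1 + p.length + 1) := by
              simp [pvFindCut, hin']
            simp only [Bool.not_false] at h1 h2 ⊢
            rw [h1, h2]
            have he : i + (d :: p).length + 1 = i + 1 + p.length + 1 := by simp; omega
            rw [he]
      · -- inside a string: skip regardless of d
        have hi' : inStr = true := by cases inStr <;> simp_all
        subst hi'
        simp only [pvScanA]
        rw [if_neg (by simp [hq]), if_neg (by simp), ih true (i + 1), hsplit, hs]
        have h1 : pvFindCut ((d :: p) :: ps) (!true) i
            = pvFindCut ps true (i + (d :: p).length + 1) := by
          simp [pvFindCut]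
        have h2 : pvFindCut (p :: ps) (!true) (i + 1)
            = pvFindCut ps true (i + 1 + p.length + 1) := by
          simp [pvFindCut]
        simp only [Bool.not_true] at h1 h2 ⊢
        rw [h1, h2]
        have he : i + (d :: p).length + 1 = i + 1 + p.length + 1 := by simp; omega
        rw [he]

-- per-line: A's step equals B's step
theorem pvLine_eq (acc : List (List Char)) (line : List Char) :
    pvLineA acc line = pvLineB acc line := by
  unfold pvLineA pvLineB
  by_cases hc : PySem.Chars.startswith (PySem.Chars.strip line) ['#'] = true
  · simp [hc]
  · have hc' : PySem.Chars.startswith (PySem.Chars.strip line) ['#'] = false := by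
      cases h : PySem.Chars.startswith (PySem.Chars.strip line) ['#'] <;> simp_all
    simp only [hc', Bool.false_eq_true, if_false, Bool.not_false, Bool.and_true]
    have hmain := pv_scan_eq_cut line line false 0
    simp only [Bool.not_false] at hmain
    rw [pv_splitOn_single]
    cases hin : PySem.Chars.isIn ['#'] line with
    | true =>
      rw [hmain]
      simp
    | false =>
      have hno : '#' ∉ line := by
        rw [pv_isIn_hash] at hin
        exact (pvFirstHash?_eq_none_iff line).mp (by cases h : pvFirstHash? line <;> simp_all)
      rw [pvScanA_no_hash line line false 0 hno] at hmain
      simp only [Bool.false_eq_true, if_false]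
      conv_lhs => rw [hmain]

-- ===== VERDICT (by name: the statement is the Claim_ definition above) =====
theorem remove_json_comments_spec : Claim_equal_remove_json_comments := by
  intro json_text _
  unfold Spec_remove_json_comments remove_json_comments remove_json_comments_alt
  congr 2
  exact PySem.List.foldl_congr_mem _ _ _ _ (fun acc x _ => pvLine_eq acc x)
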